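-- pv_equiv track=rewrite | github.com/KawasakiHaruto712/research | processing_file/checkList/ngram_req_and_non.py | ngram_frequecy_count
-- ===== SOURCE A (Python) =====
-- def ngram_frequecy_count(comments_ngram, ngram_variations):
--
--     ngram_sum = []
--     for variations in ngram_variations:
--         count = 0
--         for comments in comments_ngram:
--             if variations in comments:
--                 count += 1
--         ngram_sum.append(count)
--
--     return ngram_sum
-- ===== SOURCE B (Python) =====
-- def ngram_frequecy_count(comments_ngram, ngram_variations):
--     # One pass: count, for each ngram, how many comments contain it (unique per comment).
--     freq = {}
--     for comments in comments_ngram: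
--         for g in dict.fromkeys(comments):  # distinct ngrams of this comment, in order
--             freq[g] = freq.get(g, 0) + 1
--     return [freq.get(v, 0) for v in ngram_variations]
-- ===== Notes on version B (the rewrite author's own statement) =====
-- stated objective: faster
-- what changed: Instead of scanning all comments once per variation, B builds a dict counting for each ngram the number of comments containing it (deduplicated per comment) in one pass, then answers each variation by a dict lookup.
import Mathlib
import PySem

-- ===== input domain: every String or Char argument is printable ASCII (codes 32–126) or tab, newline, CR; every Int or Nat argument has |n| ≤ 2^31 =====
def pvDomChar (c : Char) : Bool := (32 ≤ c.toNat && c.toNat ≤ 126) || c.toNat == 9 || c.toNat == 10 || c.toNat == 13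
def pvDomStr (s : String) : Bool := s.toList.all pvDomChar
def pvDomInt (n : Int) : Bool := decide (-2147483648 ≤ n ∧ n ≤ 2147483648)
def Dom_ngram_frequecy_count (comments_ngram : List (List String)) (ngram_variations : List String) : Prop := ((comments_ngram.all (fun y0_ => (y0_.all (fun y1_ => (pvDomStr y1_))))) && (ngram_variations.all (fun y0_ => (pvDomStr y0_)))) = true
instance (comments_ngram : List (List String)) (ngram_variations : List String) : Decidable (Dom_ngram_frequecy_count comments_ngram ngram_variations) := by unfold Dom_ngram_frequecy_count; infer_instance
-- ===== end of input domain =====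

-- B replaces A's per-variation scan of all comments by one dict counting, per ngram,
-- the comments containing it (objective: faster; a timing run measures it).
-- ===== PORT A =====
def ngram_frequecy_count (comments_ngram : List (List String)) (ngram_variations : List String) : List Int :=
  ngram_variations.foldl
    (fun ngram_sum variations =>
      ngram_sum ++ [comments_ngram.foldl
        (fun count comments => if variations ∈ comments then count + 1 else count) (0 : Int)])
    []

-- ===== PORT B =====
def ngram_frequecy_count_alt (comments_ngram : List (List String)) (ngram_variations : List String) : List Int :=
  let freq : PySem.Dict String Int :=
    comments_ngram.foldl
      (fun freq comments =>
        (PySem.List.dedup comments).foldl (fun freq g => freq.modify g 0 (· + 1)) freq)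
      PySem.Dict.empty
  ngram_variations.map (fun v => freq.getD v 0)

-- ===== PRECONDITION & SPEC =====
def Spec_ngram_frequecy_count (comments_ngram : List (List String)) (ngram_variations : List String) (out : List Int) : Prop := out = ngram_frequecy_count_alt comments_ngram ngram_variations
instance (comments_ngram : List (List String)) (ngram_variations : List String) (out : List Int) : Decidable (Spec_ngram_frequecy_count comments_ngram ngram_variations out) := by unfold Spec_ngram_frequecy_count; infer_instance

-- ===== CLAIM (what is proved, stated in full; the proofs are below) =====
def Claim_equal_ngram_frequecy_count : Prop := ∀ (comments_ngram : List (List String)) (ngram_variations : List String), Dom_ngram_frequecy_count comments_ngram ngram_variations → Spec_ngram_frequecy_count comments_ngram ngram_variations (ngram_frequecy_count comments_ngram ngram_variations)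

-- ===== LEMMAS AND PROOFS =====

-- A's inner loop counts the comments containing v.
theorem pv_a_inner (v : String) (cs : List (List String)) (n : Int) :
    cs.foldl (fun count c => if v ∈ c then count + 1 else count) n
      = n + (cs.countP (fun c => decide (v ∈ c)) : Int) := by
  induction cs generalizing n with
  | nil => simp
  | cons c cs ih =>
    simp only [List.foldl_cons, List.countP_cons, ih]
    by_cases h : v ∈ c <;> simp [h] <;> omega

-- B's dict, after all comments, holds for each v the number of comments containing v.
theorem pv_b_freq (v : String) (cs : List (List String)) (d : PySem.Dict String Int) :
    (cs.foldl
      (fun freq comments =>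
        (PySem.List.dedup comments).foldl (fun freq g => freq.modify g 0 (· + 1)) freq)
      d).getD v 0
      = d.getD v 0 + (cs.countP (fun c => decide (v ∈ c)) : Int) := by
  induction cs generalizing d with
  | nil => simp
  | cons c cs ih =>
    simp only [List.foldl_cons, List.countP_cons, ih,
      PySem.Dict.getD_foldl_modify_add_one]
    have hcount : (PySem.List.dedup c).count v = if v ∈ c then 1 else 0 := by
      by_cases h : v ∈ c
      · have hv : v ∈ PySem.List.dedup c := (PySem.List.mem_dedup c v).2 h
        rw [if_pos h]
        exact List.count_eq_one_of_mem (PySem.List.nodup_dedup c) hv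
      · have hv : v ∉ PySem.List.dedup c := fun hm => h ((PySem.List.mem_dedup c v).1 hm)
        rw [if_neg h]
        exact List.count_eq_zero.2 hv
    rw [hcount]
    by_cases h : v ∈ c <;> simp [h] <;> omega

-- A's outer loop (append-accumulator) is a map.
theorem pv_a_outer (f : String → Int) (vs : List String) (acc : List Int) :
    vs.foldl (fun ngram_sum v => ngram_sum ++ [f v]) acc = acc ++ vs.map f := by
  induction vs generalizing acc with
  | nil => simp
  | cons v vs ih => simp [ih]

-- ===== VERDICT (by name: the statement is the Claim_ definition above) =====
theorem ngram_frequecy_count_spec : Claim_equal_ngram_frequecy_count := by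
  intro cs vs _
  unfold Spec_ngram_frequecy_count ngram_frequecy_count ngram_frequecy_count_alt
  rw [pv_a_outer]
  simp only [List.nil_append]
  exact List.map_congr_left fun v _ => by
    rw [pv_a_inner, pv_b_freq]; simp
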